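-- pv_equiv track=rewrite | github.com/Hellinferno/Titan | retriever.py | filter_chunks_by_character
-- ===== SOURCE A (Python) =====
-- def filter_chunks_by_character(chunks: list, character_name: str) -> list:
--     """
--     Filter chunk list to prioritize those mentioning the character.
--
--     Args:
--         chunks: List of text chunks (strings)
--         character_name: Name to search for
--
--     Returns:
--         Reordered list with character-relevant chunks first
--     """
--     if not character_name:
--         return chunks
--
--     relevant = []
--     others = []
--
--     name_lower = character_name.lower()
--     for chunk in chunks:
--         if name_lower in chunk.lower():
--             relevant.append(chunk)
--         else:
--             others.append(chunk)
--
--     return relevant + others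
-- ===== SOURCE B (Python) =====
-- def filter_chunks_by_character(chunks: list, character_name: str) -> list:
--     if not character_name:
--         return chunks
--     name_lower = character_name.lower()
--     return sorted(chunks, key=lambda chunk: name_lower not in chunk.lower())
-- ===== Notes on version B (the rewrite author's own statement) =====
-- stated objective: idiomatic
-- what changed: Replaces the explicit relevant/others partition loop with a concatenation by a single stable sort keyed on (name not in chunk), so membership-ordered output falls out of sorted()'s stability.
import Mathlib
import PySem

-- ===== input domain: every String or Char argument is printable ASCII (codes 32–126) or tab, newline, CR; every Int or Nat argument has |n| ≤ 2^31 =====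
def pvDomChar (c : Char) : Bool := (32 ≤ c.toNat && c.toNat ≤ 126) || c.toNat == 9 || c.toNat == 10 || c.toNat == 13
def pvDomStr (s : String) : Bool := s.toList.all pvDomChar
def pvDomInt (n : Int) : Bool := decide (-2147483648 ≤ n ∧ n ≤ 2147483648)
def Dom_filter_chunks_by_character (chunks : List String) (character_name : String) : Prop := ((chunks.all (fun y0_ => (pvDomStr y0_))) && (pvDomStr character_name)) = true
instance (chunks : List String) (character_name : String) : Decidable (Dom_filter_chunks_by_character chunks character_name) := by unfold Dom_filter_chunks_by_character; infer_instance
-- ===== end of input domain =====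

-- B reorders via one stable sort keyed on membership instead of A's two-list partition loop; objective: more idiomatic, same result.


-- ===== PORT A =====
def filter_chunks_by_character (chunks : List String) (character_name : String) : List String :=
  if character_name = "" then chunks
  else
    let name_lower := PySem.Str.lower character_name
    let acc := chunks.foldl
      (fun (p : List String × List String) chunk =>
        if PySem.Str.isIn name_lower (PySem.Str.lower chunk)
        then (p.1 ++ [chunk], p.2)
        else (p.1, p.2 ++ [chunk]))
      ([], [])
    acc.1 ++ acc.2

-- ===== PORT B =====
def filter_chunks_by_character_alt (chunks : List String) (character_name : String) : List String :=
  if character_name = "" then chunks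
  else
    let name_lower := PySem.Str.lower character_name
    PySem.List.sorted chunks
      (fun chunk => !(PySem.Str.isIn name_lower (PySem.Str.lower chunk))) false

-- ===== PRECONDITION & SPEC =====
def Spec_filter_chunks_by_character (chunks : List String) (character_name : String) (out : List String) : Prop := out = filter_chunks_by_character_alt chunks character_name
instance (chunks : List String) (character_name : String) (out : List String) : Decidable (Spec_filter_chunks_by_character chunks character_name out) := by unfold Spec_filter_chunks_by_character; infer_instance

-- ===== CLAIM (what is proved, stated in full; the proofs are below) =====
def Claim_equal_filter_chunks_by_character : Prop := ∀ (chunks : List String) (character_name : String), Dom_filter_chunks_by_character chunks character_name → Spec_filter_chunks_by_character chunks character_name (filter_chunks_by_character chunks character_name)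

-- ===== LEMMAS AND PROOFS =====

-- insertBy with key true ( !p x = true ) never goes before anything: appended at the end
theorem insertBy_append_of_key_true {α : Type} (p : α → Bool) (x : α) (hx : p x = false)
    (L : List α) :
    PySem.List.insertBy (fun a b => decide ((!p a) < (!p b))) x L = L ++ [x] := by
  induction L with
  | nil => rfl
  | cons y ys ih =>
    show (if decide ((!p x) < (!p y)) = true then x :: y :: ys
          else y :: PySem.List.insertBy (fun a b => decide ((!p a) < (!p b))) x ys) = (y :: ys) ++ [x]
    rw [show decide ((!p x) < (!p y)) = false by simp [hx], if_neg (by simp), ih]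
    rfl

-- insertBy with key false goes right before the "others" block
theorem insertBy_before_others {α : Type} (p : α → Bool) (x : α) (hx : p x = true)
    (A B : List α) (hA : ∀ a ∈ A, p a = true) (hB : ∀ b ∈ B, p b = false) :
    PySem.List.insertBy (fun a b => decide ((!p a) < (!p b))) x (A ++ B) = A ++ x :: B := by
  induction A with
  | nil =>
    cases B with
    | nil => rfl
    | cons y ys =>
      have hy : p y = false := hB y (by simp)
      show (if decide ((!p x) < (!p y)) = true then x :: y :: ys
            else y :: PySem.List.insertBy (fun a b => decide ((!p a) < (!p b))) x ys) = [] ++ x :: y :: ys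
      rw [if_pos (by simp [hx, hy])]
      rfl
  | cons a A' ih =>
    have ha : p a = true := hA a (by simp)
    show (if decide ((!p x) < (!p a)) = true then x :: a :: (A' ++ B)
          else a :: PySem.List.insertBy (fun a b => decide ((!p a) < (!p b))) x (A' ++ B))
        = (a :: A') ++ x :: B
    rw [if_neg (by simp [hx, ha]), ih (fun c hc => hA c (by simp [hc]))]
    rfl

-- the insertion-sort foldl keeps the invariant "p-block ++ not-p-block"
theorem foldl_insertBy_partition {α : Type} (p : α → Bool) (xs : List α) :
    ∀ (A B : List α), (∀ a ∈ A, p a = true) → (∀ b ∈ B, p b = false) →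
    xs.foldl (fun acc x => PySem.List.insertBy (fun a b => decide ((!p a) < (!p b))) x acc) (A ++ B)
      = (A ++ xs.filter p) ++ (B ++ xs.filter (fun x => !p x)) := by
  induction xs with
  | nil => intro A B _ _; simp
  | cons x xs ih =>
    intro A B hA hB
    simp only [List.foldl_cons]
    by_cases hx : p x = true
    · rw [insertBy_before_others p x hx A B hA hB,
        show A ++ x :: B = (A ++ [x]) ++ B by simp,
        ih (A ++ [x]) B (by
          intro a ha
          rcases List.mem_append.mp ha with h | h
          · exact hA a h
          · simp at h; simpa [h] using hx) hB]
      simp [hx]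
    · have hx' : p x = false := by simpa using hx
      rw [insertBy_append_of_key_true p x hx' (A ++ B),
        show A ++ B ++ [x] = A ++ (B ++ [x]) by simp,
        ih A (B ++ [x]) hA (by
          intro b hb
          rcases List.mem_append.mp hb with h | h
          · exact hB b h
          · simp at h; simpa [h] using hx')]
      simp [hx']

-- the stable boolean-key sort is exactly "matching first, then the rest"
theorem sorted_bool_key_eq_filter {α : Type} (p : α → Bool) (xs : List α) :
    PySem.List.sorted xs (fun x => !p x) false
      = xs.filter p ++ xs.filter (fun x => !p x) := by
  rw [PySem.List.sorted_eq_foldl_insertBy]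
  simpa using foldl_insertBy_partition p xs [] [] (by simp) (by simp)

-- A's pair-building foldl computes the two filters
theorem foldl_pair_partition {α : Type} (p : α → Bool) (xs : List α) :
    ∀ (r o : List α),
    xs.foldl (fun (acc : List α × List α) x =>
        if p x then (acc.1 ++ [x], acc.2) else (acc.1, acc.2 ++ [x])) (r, o)
      = (r ++ xs.filter p, o ++ xs.filter (fun x => !p x)) := by
  induction xs with
  | nil => intro r o; simp
  | cons x xs ih =>
    intro r o
    by_cases hx : p x = true
    · simp [List.foldl_cons, hx, ih]
    · simp [List.foldl_cons, hx, ih]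

-- ===== VERDICT (by name: the statement is the Claim_ definition above) =====
theorem filter_chunks_by_character_spec : Claim_equal_filter_chunks_by_character := by
  intro chunks character_name _
  unfold Spec_filter_chunks_by_character filter_chunks_by_character filter_chunks_by_character_alt
  by_cases h : character_name = ""
  · simp [h]
  · simp only [h, if_false]
    rw [sorted_bool_key_eq_filter
      (fun chunk => PySem.Str.isIn (PySem.Str.lower character_name) (PySem.Str.lower chunk)) chunks,
      foldl_pair_partition
      (fun chunk => PySem.Str.isIn (PySem.Str.lower character_name) (PySem.Str.lower chunk)) chunks [] []]
    simp
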